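-- pv_equiv track=rewrite | github.com/pedroKomcorp/avaliadorRetiradaDoIcmsBC | src/app.py | format_cnpj
-- ===== SOURCE A (Python) =====
-- def format_cnpj(cnpj):
--     # Remove tudo que não é número
--     cnpj = ''.join(filter(str.isdigit, cnpj))
--     if len(cnpj) == 0:
--         return "xxx.xxx.xx/xxxx-xx"
--
--     # Aplica a máscara de CNPJ
--     formatted = "xxx.xxx.xx/xxxx-xx"
--     for i in range(len(cnpj)):
--         formatted = formatted.replace('x', cnpj[i], 1)
--     return formatted
-- ===== SOURCE B (Python) =====
-- def format_cnpj(cnpj):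
--     digits = iter(c for c in cnpj if c.isdigit())
--     return ''.join(next(digits, 'x') if ch == 'x' else ch
--                    for ch in "xxx.xxx.xx/xxxx-xx")
-- ===== Notes on version B (the rewrite author's own statement) =====
-- stated objective: simpler
-- what changed: B makes one forward pass over the fixed mask template, consuming filtered digits where the mask has 'x', instead of A's repeated string.replace('x', d, 1) rebuilds of the whole mask with a special-case empty guard.
import Mathlib
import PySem

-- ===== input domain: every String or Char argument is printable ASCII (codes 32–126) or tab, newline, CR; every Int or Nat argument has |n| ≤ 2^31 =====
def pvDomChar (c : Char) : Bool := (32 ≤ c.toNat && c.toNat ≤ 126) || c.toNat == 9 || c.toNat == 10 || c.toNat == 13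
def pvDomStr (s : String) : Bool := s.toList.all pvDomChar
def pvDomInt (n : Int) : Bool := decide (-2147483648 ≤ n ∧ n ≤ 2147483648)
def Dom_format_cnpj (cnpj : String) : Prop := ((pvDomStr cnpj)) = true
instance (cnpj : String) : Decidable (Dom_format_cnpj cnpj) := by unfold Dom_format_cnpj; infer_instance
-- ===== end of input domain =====

-- B formats the CNPJ by one pass over the mask template consuming digits at the 'x' slots,
-- instead of A's repeated replace-first-'x' rebuilds; same return value, objective: simpler.

-- ===== PORT A =====
-- s.replace('x', d, 1): replace the first 'x' (if any) by d
def pvReplFirst : List Char → Char → List Char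
  | [], _ => []
  | c :: cs, d => if c = 'x' then d :: cs else c :: pvReplFirst cs d

def format_cnpj (cnpj : String) : String :=
  -- cnpj = ''.join(filter(str.isdigit, cnpj))
  let digits := cnpj.toList.filter PySem.Chars.isdigit
  if digits.length = 0 then "xxx.xxx.xx/xxxx-xx"
  else
    -- for i in range(len(cnpj)): formatted = formatted.replace('x', cnpj[i], 1)
    String.mk (digits.foldl pvReplFirst "xxx.xxx.xx/xxxx-xx".toList)

-- ===== PORT B =====
-- one pass over the mask: at 'x' take the next digit (or keep 'x'), else copy the char
def pvFill : List Char → List Char → List Char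
  | [], _ => []
  | m :: ms, ds =>
    if m = 'x' then
      match ds with
      | [] => m :: pvFill ms []
      | d :: ds' => d :: pvFill ms ds'
    else m :: pvFill ms ds

def format_cnpj_alt (cnpj : String) : String :=
  String.mk (pvFill "xxx.xxx.xx/xxxx-xx".toList (cnpj.toList.filter PySem.Chars.isdigit))

-- ===== PRECONDITION & SPEC =====
def Spec_format_cnpj (cnpj : String) (out : String) : Prop := out = format_cnpj_alt cnpj
instance (cnpj : String) (out : String) : Decidable (Spec_format_cnpj cnpj out) := by unfold Spec_format_cnpj; infer_instance

-- ===== CLAIM (what is proved, stated in full; the proofs are below) =====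
def Claim_equal_format_cnpj : Prop := ∀ (cnpj : String), Dom_format_cnpj cnpj → Spec_format_cnpj cnpj (format_cnpj cnpj)

-- ===== LEMMAS AND PROOFS =====
theorem pvFill_nil (m : List Char) : pvFill m [] = m := by
  induction m with
  | nil => rfl
  | cons c ms ih => simp [pvFill, ih]

theorem pvFill_replFirst (m ds : List Char) (d : Char) (hd : d ≠ 'x') :
    pvFill (pvReplFirst m d) ds = pvFill m (d :: ds) := by
  induction m generalizing ds with
  | nil => rfl
  | cons c ms ih =>
    by_cases hc : c = 'x'
    · simp [pvReplFirst, pvFill, hc, hd]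
    · simp [pvReplFirst, pvFill, hc, ih]

theorem foldl_replFirst (ds : List Char) (m : List Char)
    (h : ∀ d ∈ ds, d ≠ 'x') :
    ds.foldl pvReplFirst m = pvFill m ds := by
  induction ds generalizing m with
  | nil => simp [pvFill_nil]
  | cons d ds' ih =>
    have hd : d ≠ 'x' := h d (by simp)
    simp only [List.foldl_cons]
    rw [ih (pvReplFirst m d) (fun x hx => h x (by simp [hx])),
        pvFill_replFirst _ _ _ hd]

-- ===== VERDICT (by name: the statement is the Claim_ definition above) =====
theorem format_cnpj_spec : Claim_equal_format_cnpj := by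
  intro cnpj _
  unfold Spec_format_cnpj format_cnpj format_cnpj_alt
  simp only []
  set digits := cnpj.toList.filter PySem.Chars.isdigit with hdig
  have hx : ∀ d ∈ digits, d ≠ 'x' := by
    intro d hdmem
    have : PySem.Chars.isdigit d = true := (List.mem_filter.mp (hdig ▸ hdmem)).2
    intro he; subst he; simp [PySem.Chars.isdigit] at this
  by_cases h : digits.length = 0
  · have : digits = [] := List.length_eq_zero_iff.mp h
    simp [this, pvFill_nil]; rfl
  · simp [h, foldl_replFirst digits _ hx]
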